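-- pv_equiv track=rewrite | github.com/GODU-LZR/agentcoin | agentcoin/semantics.py | expand_capabilities
-- ===== SOURCE A (Python) =====
-- CAPABILITY_PROFILES: dict[str, dict[str, list[str] | str]] = {
--     "worker": {"title": "Worker", "aliases": ["executor", "implementer"], "implies": []},
--     "codegen": {"title": "Code Generation Worker", "aliases": ["coder", "coding", "developer"], "implies": ["worker"]},
--     "reviewer": {"title": "Reviewer", "aliases": ["review"], "implies": []},
--     "ai-reviewer": {"title": "AI Reviewer", "aliases": ["ai-review", "llm-reviewer"], "implies": ["reviewer"]},
--     "human-reviewer": {"title": "Human Reviewer", "aliases": ["human-review"], "implies": ["reviewer"]},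
--     "committee-member": {"title": "Dispute Committee Member", "aliases": ["juror", "arbiter"], "implies": ["reviewer"]},
--     "planner": {"title": "Planner", "aliases": ["coordinator", "orchestrator"], "implies": []},
--     "task-routing": {"title": "Task Router", "aliases": ["dispatcher", "router"], "implies": ["planner"]},
--     "local-command": {"title": "Local Command Executor", "aliases": ["shell", "cli-tool"], "implies": ["worker"]},
--     "http-json": {"title": "HTTP JSON Runtime", "aliases": ["http-agent"], "implies": ["worker"]},
--     "openai-chat": {"title": "OpenAI-Compatible Chat Runtime", "aliases": ["openai-compatible", "openclaw-gateway"], "implies": ["worker"]},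
--     "ollama-chat": {"title": "Ollama Chat Runtime", "aliases": ["ollama", "local-llm"], "implies": ["worker"]},
-- }
--
-- def expand_capabilities(capabilities: list[str] | None) -> set[str]:
--     raw_values = [str(item or "").strip().lower() for item in list(capabilities or []) if str(item or "").strip()]
--     expanded = set(raw_values)
--     alias_map: dict[str, str] = {}
--     for capability, profile in CAPABILITY_PROFILES.items():
--         alias_map[capability] = capability
--         for alias in list(profile.get("aliases") or []):
--             alias_map[str(alias).strip().lower()] = capability
--     queue = [alias_map.get(item, item) for item in raw_values]
--     while queue:
--         current = queue.pop(0)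
--         if current in expanded:
--             pass
--         expanded.add(current)
--         profile = CAPABILITY_PROFILES.get(current) or {}
--         for implied in list(profile.get("implies") or []):
--             implied_key = str(implied).strip().lower()
--             if implied_key and implied_key not in expanded:
--                 queue.append(implied_key)
--     normalized = set(alias_map.get(item, item) for item in expanded)
--     return normalized | expanded
-- ===== SOURCE B (Python) =====
-- CAPABILITY_PROFILES: dict[str, dict[str, list[str] | str]] = {
--     "worker": {"title": "Worker", "aliases": ["executor", "implementer"], "implies": []},
--     "codegen": {"title": "Code Generation Worker", "aliases": ["coder", "coding", "developer"], "implies": ["worker"]},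
--     "reviewer": {"title": "Reviewer", "aliases": ["review"], "implies": []},
--     "ai-reviewer": {"title": "AI Reviewer", "aliases": ["ai-review", "llm-reviewer"], "implies": ["reviewer"]},
--     "human-reviewer": {"title": "Human Reviewer", "aliases": ["human-review"], "implies": ["reviewer"]},
--     "committee-member": {"title": "Dispute Committee Member", "aliases": ["juror", "arbiter"], "implies": ["reviewer"]},
--     "planner": {"title": "Planner", "aliases": ["coordinator", "orchestrator"], "implies": []},
--     "task-routing": {"title": "Task Router", "aliases": ["dispatcher", "router"], "implies": ["planner"]},
--     "local-command": {"title": "Local Command Executor", "aliases": ["shell", "cli-tool"], "implies": ["worker"]},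
--     "http-json": {"title": "HTTP JSON Runtime", "aliases": ["http-agent"], "implies": ["worker"]},
--     "openai-chat": {"title": "OpenAI-Compatible Chat Runtime", "aliases": ["openai-compatible", "openclaw-gateway"], "implies": ["worker"]},
--     "ollama-chat": {"title": "Ollama Chat Runtime", "aliases": ["ollama", "local-llm"], "implies": ["worker"]},
-- }
--
--
-- def _norm(value) -> str:
--     return str(value or "").strip().lower()
--
--
-- # alias (and canonical) name -> canonical capability
-- _ALIASES: dict[str, str] = {name: cap
--                             for cap, profile in CAPABILITY_PROFILES.items()
--                             for name in [cap, *(_norm(a) for a in profile["aliases"])]}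
--
--
-- def _closure(cap: str, acc: list[str]) -> list[str]:
--     if cap not in acc:
--         acc.append(cap)
--         for implied in CAPABILITY_PROFILES.get(cap, {}).get("implies", []):
--             _closure(_norm(implied), acc)
--     return acc
--
--
-- # canonical capability -> its full implication closure, computed ONCE at import time
-- _CLOSURE: dict[str, list[str]] = {cap: _closure(cap, []) for cap in CAPABILITY_PROFILES}
--
--
-- def expand_capabilities(capabilities: list[str] | None) -> set[str]:
--     raw = [v for v in map(_norm, capabilities or []) if v]
--     canons = [_ALIASES.get(v, v) for v in raw]
--     implied = [name for c in canons for name in _CLOSURE.get(c, [c])]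
--     return set(canons + implied + raw)
-- ===== Notes on version B (the rewrite author's own statement) =====
-- stated objective: alternative
-- what changed: B precomputes the transitive implication closure of the fixed capability graph once at import time (a memoized recursive DFS building a closure table), so each call does no graph traversal at all: it maps raw values to canonical names, flattens closure-table lookups and unions with the raw spellings, replacing A's per-call FIFO-queue BFS (list.pop(0)) plus final alias-renormalization pass.
import Mathlib
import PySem

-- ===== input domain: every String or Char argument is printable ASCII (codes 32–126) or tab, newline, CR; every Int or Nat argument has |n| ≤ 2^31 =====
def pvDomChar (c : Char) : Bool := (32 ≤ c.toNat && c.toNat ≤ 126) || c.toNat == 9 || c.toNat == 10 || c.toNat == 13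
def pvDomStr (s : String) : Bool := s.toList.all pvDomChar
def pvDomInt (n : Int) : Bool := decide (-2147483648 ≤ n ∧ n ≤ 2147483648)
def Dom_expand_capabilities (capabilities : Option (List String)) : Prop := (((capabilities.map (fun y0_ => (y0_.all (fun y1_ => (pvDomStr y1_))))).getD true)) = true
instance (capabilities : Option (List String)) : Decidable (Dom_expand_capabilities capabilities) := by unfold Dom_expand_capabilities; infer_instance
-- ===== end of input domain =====

-- B precomputes the implication closure of the fixed capability graph once (recursive DFS
-- into a table), so a call only does lookups and a flatten instead of A's per-call BFS
-- plus alias-renormalization pass (objective: alternative).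

-- shared module context: the CAPABILITY_PROFILES constant and the normalization helper
-- (Python: str(x or "").strip().lower(); 'x or ""' is the identity on str)
def pvNorm (s : String) : String := PySem.Str.lower (PySem.Str.strip s)

structure PvProfile where
  title : String
  aliases : List String
  implies : List String
deriving DecidableEq, Repr

-- CAPABILITY_PROFILES; the heterogeneous Python profile dict {"title": str, "aliases": [...], "implies": [...]}
-- is modelled by the structure PvProfile (all 12 entries carry exactly these three fields)
def pvCaps : PySem.Dict String PvProfile := PySem.Dict.mk [
  ("worker", ⟨"Worker", ["executor", "implementer"], []⟩),
  ("codegen", ⟨"Code Generation Worker", ["coder", "coding", "developer"], ["worker"]⟩),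
  ("reviewer", ⟨"Reviewer", ["review"], []⟩),
  ("ai-reviewer", ⟨"AI Reviewer", ["ai-review", "llm-reviewer"], ["reviewer"]⟩),
  ("human-reviewer", ⟨"Human Reviewer", ["human-review"], ["reviewer"]⟩),
  ("committee-member", ⟨"Dispute Committee Member", ["juror", "arbiter"], ["reviewer"]⟩),
  ("planner", ⟨"Planner", ["coordinator", "orchestrator"], []⟩),
  ("task-routing", ⟨"Task Router", ["dispatcher", "router"], ["planner"]⟩),
  ("local-command", ⟨"Local Command Executor", ["shell", "cli-tool"], ["worker"]⟩),
  ("http-json", ⟨"HTTP JSON Runtime", ["http-agent"], ["worker"]⟩),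
  ("openai-chat", ⟨"OpenAI-Compatible Chat Runtime", ["openai-compatible", "openclaw-gateway"], ["worker"]⟩),
  ("ollama-chat", ⟨"Ollama Chat Runtime", ["ollama", "local-llm"], ["worker"]⟩)]

-- (CAPABILITY_PROFILES.get(c) or {}).get("implies") or []
def pvImplies (c : String) : List String := ((pvCaps.get? c).map PvProfile.implies).getD []

-- the implied names, each normalized (str(i).strip().lower())
def pvKids (c : String) : List String := (pvImplies c).map pvNorm

-- termination measure helper for the loops on both sides
def pvWeight (c : String) : Nat := 1 + (pvImplies c).length

-- the implies lists of the constant table (used for termination of the loops)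
theorem pvImplies_cases (c : String) :
    pvImplies c = [] ∨ pvImplies c = ["worker"] ∨ pvImplies c = ["reviewer"] ∨ pvImplies c = ["planner"] := by
  unfold pvImplies
  cases h : pvCaps.get? c with
  | none => simp
  | some p =>
    have hp : (c, p) ∈ pvCaps.items := PySem.Dict.mem_items_of_get?_eq_some pvCaps h
    have hv : p ∈ pvCaps.items.map (fun x => x.2) := List.mem_map_of_mem hp
    have hall : ∀ q ∈ pvCaps.items.map (fun x => x.2),
        PvProfile.implies q = [] ∨ PvProfile.implies q = ["worker"] ∨
        PvProfile.implies q = ["reviewer"] ∨ PvProfile.implies q = ["planner"] := by decide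
    simpa using hall p hv

theorem pvKids_cases (c : String) :
    pvKids c = [] ∨ pvKids c = ["worker"] ∨ pvKids c = ["reviewer"] ∨ pvKids c = ["planner"] := by
  have h := pvImplies_cases c
  have h1 : pvNorm "worker" = "worker" := by decide
  have h2 : pvNorm "reviewer" = "reviewer" := by decide
  have h3 : pvNorm "planner" = "planner" := by decide
  unfold pvKids
  rcases h with h | h | h | h <;> rw [h] <;> simp [h1, h2, h3]

theorem pvKids_leaf {c w : String} (hw : w ∈ pvKids c) : pvImplies w = [] := by
  rcases pvKids_cases c with h | h | h | h <;> rw [h] at hw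
  · exact absurd hw (by simp)
  all_goals (simp at hw; subst hw; decide)

theorem pvWeight_kid {c w : String} (hw : w ∈ pvKids c) : pvWeight w = 1 := by
  simp [pvWeight, pvKids_leaf hw]

theorem pvWeight_sum_filter_kids_lt (c : String) (P : String → Bool) :
    ((((pvKids c).filter P).map pvWeight).sum) < pvWeight c := by
  have h1 : ∀ w ∈ (pvKids c).filter P, pvWeight w = 1 := fun w hw =>
    pvWeight_kid (List.mem_of_mem_filter hw)
  have h2 : (((pvKids c).filter P).map pvWeight).sum = ((pvKids c).filter P).length := by
    rw [List.map_congr_left h1]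
    simp [List.map_const']
  rw [h2]
  have h3 : ((pvKids c).filter P).length ≤ (pvKids c).length := List.length_filter_le _ _
  have h4 : (pvKids c).length = (pvImplies c).length := by simp [pvKids]
  simp only [pvWeight]
  omega

-- ===== PORT A =====

-- the alias_map built by the two nested for-loops
def pvAliasA : PySem.Dict String String :=
  pvCaps.items.foldl (fun am cp =>
    let am := am.insert cp.1 cp.1
    cp.2.aliases.foldl (fun am al => am.insert (pvNorm al) cp.1) am) PySem.Dict.empty

-- the 'while queue:' loop; 'if current in expanded: pass' has no effect and is dropped;
-- the inner for appends implied_key when it is nonempty and not yet in expanded (expanded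
-- does not change during that inner for, so it is a filter)
def pvAloop (expanded : PySem.Set String) (queue : List String) : PySem.Set String :=
  match queue with
  | [] => expanded
  | current :: rest =>
    let expanded2 := PySem.Set.add expanded current
    let appended := (pvKids current).filter (fun w => w != "" && !(PySem.Set.contains expanded2 w))
    pvAloop expanded2 (rest ++ appended)
termination_by (queue.map pvWeight).sum
decreasing_by
  simp only [List.map_append, List.sum_append, List.map_cons, List.sum_cons]
  have := pvWeight_sum_filter_kids_lt current (fun w => w != "" && !(PySem.Set.contains (PySem.Set.add expanded current) w))
  omega

def expand_capabilities (capabilities : Option (List String)) : List String :=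
  -- raw_values = [str(item or "").strip().lower() for item in list(capabilities or []) if str(item or "").strip()]
  let raw := ((capabilities.getD []).filter (fun item => PySem.Str.strip item != "")).map pvNorm
  let expanded := PySem.Set.ofList raw
  let queue := raw.map (fun item => pvAliasA.getD item item)
  let expanded := pvAloop expanded queue
  -- normalized = set(alias_map.get(item, item) for item in expanded)
  let normalized := PySem.Set.ofList (expanded.map (fun item => pvAliasA.getD item item))
  PySem.Set.union normalized expanded

-- ===== PORT B =====

-- the alias dict comprehension {name: cap for cap, profile in ... for name in [cap, *(norm(a) ...)]}
def pvAliasB : PySem.Dict String String :=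
  PySem.Dict.ofList (pvCaps.items.flatMap (fun cp =>
    (cp.1 :: cp.2.aliases.map pvNorm).map (fun name => (name, cp.1))))

-- _closure(cap, acc): append cap unless seen, then recurse into the implied names;
-- pvClosureList is the ported 'for implied in ...: _closure(_norm(implied), acc)' loop
mutual
def pvClosure (cap : String) (acc : List String) : List String :=
  if cap ∈ acc then acc
  else pvClosureList (pvImplies cap) (acc ++ [cap])
termination_by 2 * pvWeight cap
decreasing_by
  rcases pvImplies_cases cap with h | h | h | h <;> simp [h, pvWeight] <;> decide

def pvClosureList (l : List String) (acc : List String) : List String :=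
  match l with
  | [] => acc
  | i :: rest => pvClosureList rest (pvClosure (pvNorm i) acc)
termination_by (l.map (fun i => 2 * pvWeight (pvNorm i))).sum + l.length
decreasing_by
  · simp; omega
  · simp; omega
end

-- _CLOSURE = {cap: _closure(cap, []) for cap in CAPABILITY_PROFILES}
def pvClosureTable : PySem.Dict String (List String) :=
  pvCaps.keys.foldl (fun d cap => d.insert cap (pvClosure cap [])) PySem.Dict.empty

def expand_capabilities_alt (capabilities : Option (List String)) : List String :=
  -- raw = [v for v in map(_norm, capabilities or []) if v]
  let raw := ((capabilities.getD []).map pvNorm).filter (fun v => v != "")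
  -- canons = [_ALIASES.get(v, v) for v in raw]
  let canons := raw.map (fun v => pvAliasB.getD v v)
  -- implied = [name for c in canons for name in _CLOSURE.get(c, [c])]
  let implied := canons.flatMap (fun c => pvClosureTable.getD c [c])
  -- set(canons + implied + raw)
  PySem.Set.ofList (canons ++ implied ++ raw)

-- ===== PRECONDITION & SPEC =====
def Spec_expand_capabilities (capabilities : Option (List String)) (out : List String) : Prop := out = expand_capabilities_alt capabilities
instance (capabilities : Option (List String)) (out : List String) : Decidable (Spec_expand_capabilities capabilities out) := by unfold Spec_expand_capabilities; infer_instance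

-- ===== CLAIM (what is proved, stated in full; the proofs are below) =====
def Claim_equal_expand_capabilities : Prop := ∀ (capabilities : Option (List String)), Dom_expand_capabilities capabilities → Spec_expand_capabilities capabilities (expand_capabilities capabilities)

-- ===== LEMMAS AND PROOFS =====

theorem update_noop {s : PySem.Set String} {l : List String} (h : ∀ x ∈ l, x ∈ s) :
    PySem.Set.update s l = s := by
  induction l generalizing s with
  | nil => rfl
  | cons a l ih =>
    rw [PySem.Set.update_cons, PySem.Set.add_of_mem (h a (by simp))]
    exact ih (fun x hx => h x (by simp [hx]))

theorem update_filter {s : PySem.Set String} {l : List String} {P : String → Bool}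
    (h : ∀ x ∈ l, P x = false → x ∈ s) :
    PySem.Set.update s (l.filter P) = PySem.Set.update s l := by
  induction l generalizing s with
  | nil => rfl
  | cons a l ih =>
    cases hP : P a with
    | true =>
      rw [List.filter_cons_of_pos hP, PySem.Set.update_cons, PySem.Set.update_cons]
      exact ih (fun x hx hPx => (PySem.Set.mem_add _ _ _).mpr (Or.inl (h x (by simp [hx]) hPx)))
    | false =>
      rw [List.filter_cons_of_neg (by simp [hP]), PySem.Set.update_cons,
        PySem.Set.add_of_mem (h a (by simp) hP)]
      exact ih (fun x hx hPx => h x (by simp [hx]) hPx)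

theorem update_map_ofList (s : PySem.Set String) (L : List String) (f : String → String) :
    PySem.Set.update s ((PySem.Set.ofList L).map f) = PySem.Set.update s (L.map f) := by
  induction L using List.reverseRecOn generalizing s with
  | nil => rfl
  | append_singleton L x ih =>
    rw [PySem.Set.ofList_append_singleton]
    by_cases hx : x ∈ PySem.Set.ofList L
    · have hx' : x ∈ L := (PySem.Set.mem_ofList _ _).mp hx
      rw [PySem.Set.add_of_mem hx, ih, List.map_append, PySem.Set.update_append]
      have hfx : f x ∈ PySem.Set.update s (L.map f) :=
        (PySem.Set.mem_update _ _ _).mpr (Or.inr (List.mem_map_of_mem hx'))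
      simp only [List.map_cons, List.map_nil]
      rw [show PySem.Set.update (PySem.Set.update s (L.map f)) [f x]
          = PySem.Set.add (PySem.Set.update s (L.map f)) (f x) from rfl,
        PySem.Set.add_of_mem hfx]
    · rw [PySem.Set.add_of_not_mem hx, List.map_append, List.map_append,
        PySem.Set.update_append, PySem.Set.update_append, ih]

theorem update_ofList (s : PySem.Set String) (L : List String) :
    PySem.Set.update s (PySem.Set.ofList L) = PySem.Set.update s L := by
  have h := update_map_ofList s L id
  simpa using h

theorem pvKids_ne_empty {c w : String} (hw : w ∈ pvKids c) : w ≠ "" := by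
  rcases pvKids_cases c with h | h | h | h <;> rw [h] at hw
  · exact absurd hw (by simp)
  all_goals (simp at hw; subst hw; decide)

theorem pvAloop_eq (E : PySem.Set String) (q : List String) :
    pvAloop E q = PySem.Set.update (PySem.Set.update E q) (q.flatMap pvKids) := by
  induction E, q using pvAloop.induct with
  | case1 E => simp [pvAloop, PySem.Set.update]
  | case2 E current rest E' appended ih =>
    rw [pvAloop]
    simp only [] at *
    rw [ih]
    have happ : appended.flatMap pvKids = [] := by
      rw [List.flatMap_eq_nil_iff]
      intro w hw
      have hw' : w ∈ pvKids current := List.mem_of_mem_filter hw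
      simp [pvKids, pvKids_leaf hw']
    rw [List.flatMap_append, happ, List.append_nil, PySem.Set.update_append]
    have hfilt : PySem.Set.update (PySem.Set.update E' rest) appended
        = PySem.Set.update (PySem.Set.update E' rest) (pvKids current) := by
      apply update_filter
      intro x hx hPx
      have hxne : x ≠ "" := pvKids_ne_empty hx
      have : PySem.Set.contains E' x = true := by
        simp only [Bool.and_eq_false_iff] at hPx
        rcases hPx with h | h
        · exact absurd (by simpa using h) (by simp [hxne])
        · simpa using h
      have hxE : x ∈ E' := (PySem.Set.contains_iff _ _).mp this
      exact (PySem.Set.mem_update _ _ _).mpr (Or.inl hxE)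
    rw [hfilt, List.flatMap_cons, PySem.Set.update_append, PySem.Set.update_cons]

set_option maxRecDepth 100000 in
theorem pvAlias_eq : pvAliasB = pvAliasA := by decide

set_option maxRecDepth 100000 in
theorem pvCanon_mem_values {s k : String} (h : pvAliasA.get? s = some k) :
    pvAliasA.getD k k = k := by
  have hp : (s, k) ∈ pvAliasA.items := PySem.Dict.mem_items_of_get?_eq_some pvAliasA h
  have hv : k ∈ pvAliasA.items.map (fun x => x.2) := List.mem_map_of_mem hp
  have hall : ∀ v ∈ pvAliasA.items.map (fun x => x.2), pvAliasA.getD v v = v := by decide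
  exact hall k hv

theorem pvCanon_idem (s : String) :
    pvAliasA.getD (pvAliasA.getD s s) (pvAliasA.getD s s) = pvAliasA.getD s s := by
  cases h : pvAliasA.get? s with
  | none => simp [PySem.Dict.getD, h]
  | some k =>
    have h1 : pvAliasA.getD s s = k := by simp [PySem.Dict.getD, h]
    rw [h1]
    exact pvCanon_mem_values h

set_option maxRecDepth 100000 in
theorem pvCanon_kid {c w : String} (hw : w ∈ pvKids c) :
    pvAliasA.getD w w = w := by
  rcases pvKids_cases c with h | h | h | h <;> rw [h] at hw
  · exact absurd hw (by simp)
  all_goals (simp at hw; subst hw; decide)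

theorem raw_eq (l : List String) :
    (l.map pvNorm).filter (fun v => v != "")
      = (l.filter (fun item => PySem.Str.strip item != "")).map pvNorm := by
  rw [List.filter_map]
  refine congrArg (List.map pvNorm) (List.filter_congr ?_)
  intro a _
  have key : (pvNorm a = "") ↔ (PySem.Str.strip a = "") := by
    unfold pvNorm
    constructor
    · intro h
      have h' := congrArg String.toList h
      simp [PySem.Str.toList_lower, PySem.Chars.lower] at h'
      exact String.toList_eq_nil_iff.mp (by rw [PySem.Str.toList_strip]; exact h')
    · intro h; rw [h]; decide
  by_cases h : PySem.Str.strip a = ""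
  · simp [Function.comp, key.mpr h, h]
  · have h2 : pvNorm a ≠ "" := fun e => h (key.mp e)
    have a1 : (pvNorm a != "") = true := bne_iff_ne.mpr h2
    have a2 : (PySem.Str.strip a != "") = true := bne_iff_ne.mpr h
    simp [Function.comp, a1, a2]

-- the closed form of A's whole computation: canonical names, then implied names, then raw
set_option maxRecDepth 100000 in
theorem A_closed (raw : List String) :
    PySem.Set.union
      (PySem.Set.ofList ((pvAloop (PySem.Set.ofList raw)
        (raw.map (fun item => pvAliasA.getD item item))).map (fun item => pvAliasA.getD item item)))
      (pvAloop (PySem.Set.ofList raw) (raw.map (fun item => pvAliasA.getD item item)))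
    = PySem.Set.update (PySem.Set.update (PySem.Set.update []
        (raw.map (fun item => pvAliasA.getD item item)))
        ((raw.map (fun item => pvAliasA.getD item item)).flatMap pvKids)) raw := by
  set canon : String → String := fun item => pvAliasA.getD item item with hcanon
  set canons : List String := raw.map canon with hcanons
  set kids : List String := canons.flatMap pvKids with hkids
  rw [pvAloop_eq]
  set M : List String := raw ++ (canons ++ kids) with hM
  have hS0 : PySem.Set.update (PySem.Set.update (PySem.Set.ofList raw) canons) kids
      = PySem.Set.ofList M := by
    rw [← PySem.Set.update_nil_left raw, ← PySem.Set.update_append, ← PySem.Set.update_append,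
      PySem.Set.update_nil_left, hM]
  set S1 : PySem.Set String := PySem.Set.update (PySem.Set.ofList canons) kids with hS1
  have hsub1 : ∀ x ∈ canons, x ∈ S1 := fun x hx =>
    (PySem.Set.mem_update _ _ _).mpr (Or.inl ((PySem.Set.mem_ofList _ _).mpr hx))
  have hsub2 : ∀ x ∈ kids, x ∈ S1 := fun x hx =>
    (PySem.Set.mem_update _ _ _).mpr (Or.inr hx)
  -- the alias-normalization pass over the closure yields exactly canons ++ kids
  have hcc : canons.map canon = canons := by
    rw [hcanons, List.map_map]
    exact List.map_congr_left (fun s _ => pvCanon_idem s)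
  have hkk : kids.map canon = kids := by
    rw [show kids.map canon = kids.map id from
      List.map_congr_left (fun w hw => by
        obtain ⟨c, _, hc⟩ := List.mem_flatMap.mp (hkids ▸ hw)
        exact pvCanon_kid hc), List.map_id]
  have hmapA : M.map canon = canons ++ (canons ++ kids) := by
    rw [hM, List.map_append, List.map_append, hcc, hkk]
  have hN : PySem.Set.ofList ((PySem.Set.ofList M).map canon) = S1 := by
    rw [← PySem.Set.update_nil_left, update_map_ofList, hmapA,
      PySem.Set.update_append, PySem.Set.update_append, PySem.Set.update_nil_left]
    rw [update_noop (fun x hx => (PySem.Set.mem_ofList _ _).mpr hx)]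
  -- adding the whole closure over S1 only re-adds the raw spellings
  have hL : PySem.Set.update S1 (PySem.Set.ofList M) = PySem.Set.update S1 raw := by
    rw [update_ofList, hM, PySem.Set.update_append, PySem.Set.update_append]
    rw [update_noop (fun x hx => (PySem.Set.mem_update _ _ _).mpr (Or.inl (hsub1 x hx)))]
    rw [update_noop (fun x hx => (PySem.Set.mem_update _ _ _).mpr (Or.inl (hsub2 x hx)))]
  rw [hS0, hN,
    show PySem.Set.union S1 (PySem.Set.ofList M) = PySem.Set.update S1 (PySem.Set.ofList M) from rfl,
    hL, hS1, PySem.Set.update_nil_left]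

-- helper for pvClosure_nil: one implied leaf
theorem closure_single (c w : String) (hc : pvImplies c = [w]) (hw : pvImplies w = [])
    (hn : pvNorm w = w) (hne : c ≠ w) : pvClosure c [] = [c, w] := by
  rw [pvClosure]
  simp only [List.not_mem_nil, if_false, hc, List.nil_append]
  rw [pvClosureList, pvClosureList, hn, pvClosure]
  have : w ∉ [c] := by simp [Ne.symm hne]
  simp only [this, if_false, hw]
  rw [pvClosureList]
  rfl

theorem closure_case (c w : String) (h : pvImplies c = [w]) (hw : pvImplies w = [])
    (hn : pvNorm w = w) : pvClosure c [] = c :: pvKids c := by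
  have hne : c ≠ w := by
    intro e
    rw [e, hw] at h
    exact absurd h (by simp)
  rw [closure_single c w h hw hn hne]
  simp [pvKids, h, hn]

theorem pvClosure_nil (c : String) : pvClosure c [] = c :: pvKids c := by
  rcases pvImplies_cases c with h | h | h | h
  · rw [pvClosure]
    simp only [List.not_mem_nil, if_false, h, List.nil_append]
    rw [pvClosureList]
    simp [pvKids, h]
  · exact closure_case c "worker" h (by decide) (by decide)
  · exact closure_case c "reviewer" h (by decide) (by decide)
  · exact closure_case c "planner" h (by decide) (by decide)

set_option maxRecDepth 100000 in
theorem closureTable_items :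
    pvClosureTable.items = pvCaps.keys.map (fun cap => (cap, pvClosure cap [])) := by
  unfold pvClosureTable
  rw [PySem.Dict.items_foldl_insert_fresh pvCaps.keys (fun a => a)
    (fun cap => pvClosure cap []) PySem.Dict.empty
    (fun a _ => PySem.Dict.contains_empty a) (by simp; decide)]
  simp [PySem.Dict.empty]

set_option maxRecDepth 100000 in
theorem keys_closureTable : pvClosureTable.keys = pvCaps.keys := by
  simp only [PySem.Dict.keys, closureTable_items, List.map_map]
  simp

set_option maxRecDepth 100000 in
theorem getD_closureTable (c : String) : pvClosureTable.getD c [c] = c :: pvKids c := by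
  by_cases hc : c ∈ pvCaps.keys
  · have hmem : (c, pvClosure c []) ∈ pvClosureTable.items := by
      rw [closureTable_items]
      exact List.mem_map_of_mem hc
    have hnd : pvClosureTable.keys.Nodup := by
      rw [keys_closureTable]
      decide
    rw [PySem.Dict.getD_of_mem_items _ hmem hnd, pvClosure_nil]
  · have hcont : pvClosureTable.contains c = false := by
      rw [PySem.Dict.contains_eq_decide_mem_keys, keys_closureTable]
      simp [hc]
    rw [PySem.Dict.getD_of_not_contains _ _ hcont]
    have hnone : pvCaps.get? c = none := by
      rw [PySem.Dict.get?_eq_none_iff_not_mem_keys]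
      exact hc
    simp [pvKids, pvImplies, hnone]

theorem update_flatMap_cons (s : PySem.Set String) (l : List String)
    (g : String → List String) (h : ∀ c ∈ l, c ∈ s) :
    PySem.Set.update s (l.flatMap (fun c => c :: g c)) = PySem.Set.update s (l.flatMap g) := by
  induction l generalizing s with
  | nil => rfl
  | cons a l ih =>
    rw [List.flatMap_cons, List.flatMap_cons, PySem.Set.update_append, PySem.Set.update_append,
      PySem.Set.update_cons, PySem.Set.add_of_mem (h a (by simp))]
    exact ih _ (fun c hc => (PySem.Set.mem_update _ _ _).mpr (Or.inl (h c (by simp [hc]))))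

theorem expand_capabilities_spec : Claim_equal_expand_capabilities := by
  intro capabilities _
  unfold Spec_expand_capabilities expand_capabilities expand_capabilities_alt
  dsimp only
  rw [pvAlias_eq, raw_eq, A_closed]
  rw [show (fun c => pvClosureTable.getD c [c]) = (fun c => c :: pvKids c) from
    funext getD_closureTable]
  rw [← PySem.Set.update_nil_left, PySem.Set.update_append, PySem.Set.update_append,
    PySem.Set.update_nil_left, ← PySem.Set.update_nil_left
      (List.map (fun v => pvAliasA.getD v v) _)]
  rw [update_flatMap_cons _ _ pvKids
    (fun c hc => (PySem.Set.mem_update _ _ _).mpr (Or.inr hc))]
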